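-- pv_equiv track=rewrite | github.com/stoll2882/Stroke-Data-Analysis-CPSC322 | myclassifiers.py | all_same_class
-- ===== SOURCE A (Python) =====
-- def all_same_class(partition):
--     label_index = len(partition[0]) - 1
--     count = 0
--     class_label = partition[0][label_index]
--     for item in partition:
--         if item[label_index] == class_label:
--             count += 1
--     if count == len(partition):
--         return True
--     else:
--         return False
-- ===== SOURCE B (Python) =====
-- def all_same_class(partition):
--     label_index = len(partition[0]) - 1
--     return all(x[label_index] == y[label_index]
--                for x, y in zip(partition, partition[1:]))
-- ===== Notes on version B (the rewrite author's own statement) =====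
-- stated objective: simpler
-- what changed: Instead of counting items whose label matches the first item's label and comparing the count to the partition length, B checks equality of labels between each adjacent pair of items (zip of the list with its tail) and returns whether all adjacent pairs agree.
import Mathlib
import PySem

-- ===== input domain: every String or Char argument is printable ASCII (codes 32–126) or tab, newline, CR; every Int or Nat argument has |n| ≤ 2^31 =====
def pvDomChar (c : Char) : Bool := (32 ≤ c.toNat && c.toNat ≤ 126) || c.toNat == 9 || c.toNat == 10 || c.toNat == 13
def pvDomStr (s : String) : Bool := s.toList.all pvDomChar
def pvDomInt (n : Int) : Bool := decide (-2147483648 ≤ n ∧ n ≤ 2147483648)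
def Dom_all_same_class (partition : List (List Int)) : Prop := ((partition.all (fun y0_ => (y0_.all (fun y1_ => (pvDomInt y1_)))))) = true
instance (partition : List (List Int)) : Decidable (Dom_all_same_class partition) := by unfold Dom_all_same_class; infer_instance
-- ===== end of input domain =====

-- B is simpler: it checks label equality between each adjacent pair of items
-- (zip with the tail) instead of counting matches against the first label.

-- ===== PORT A =====
def all_same_class (partition : List (List Int)) : Bool :=
  let label_index : Int := (((PySem.List.pyGet? partition 0).getD []).length : Int) - 1
  let class_label : Int :=
    (PySem.List.pyGet? ((PySem.List.pyGet? partition 0).getD []) label_index).getD 0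
  let count : Int := partition.foldl
    (fun c item => if (PySem.List.pyGet? item label_index).getD 0 = class_label then c + 1 else c) 0
  count == (partition.length : Int)

-- ===== PORT B =====
def all_same_class_alt (partition : List (List Int)) : Bool :=
  let label_index : Int := (((PySem.List.pyGet? partition 0).getD []).length : Int) - 1
  (partition.zip partition.tail).all
    (fun xy => (PySem.List.pyGet? xy.1 label_index).getD 0
                == (PySem.List.pyGet? xy.2 label_index).getD 0)

-- ===== PRECONDITION & SPEC =====
-- Pre_ excludes exactly the inputs where Python A raises IndexError: an empty
-- partition, an empty first row, or a row too short for the label index.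
def Pre_all_same_class (partition : List (List Int)) : Prop :=
  partition ≠ [] ∧ partition.headI ≠ [] ∧
    ∀ item ∈ partition, partition.headI.length ≤ item.length
instance (partition : List (List Int)) : Decidable (Pre_all_same_class partition) := by
  unfold Pre_all_same_class; infer_instance
def pvWitness_all_same_class : List (List Int) := [[1, 2], [3, 2]]
def Spec_all_same_class (partition : List (List Int)) (out : Bool) : Prop := out = all_same_class_alt partition
instance (partition : List (List Int)) (out : Bool) : Decidable (Spec_all_same_class partition out) := by unfold Spec_all_same_class; infer_instance

-- ===== CLAIM (what is proved, stated in full; the proofs are below) =====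
def Claim_equal_all_same_class : Prop := ∀ (partition : List (List Int)), Dom_all_same_class partition → Pre_all_same_class partition → Spec_all_same_class partition (all_same_class partition)

-- ===== LEMMAS AND PROOFS =====

-- A's loop is a countP of the items whose label equals the first label.
theorem foldl_count_eq_countP (l : List (List Int)) (f : List Int → Int) (a : Int) (c : Int) :
    l.foldl (fun c item => if f item = a then c + 1 else c) c
      = c + (l.countP (fun item => f item = a) : Int) := by
  induction l generalizing c with
  | nil => simp
  | cons x xs ih =>
    simp only [List.foldl_cons, List.countP_cons, ih]
    by_cases h : f x = a <;> simp [h]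
    ring

-- all adjacent pairs agree iff every element equals the head
theorem zip_all_adjacent_iff (f : List Int → Int) (p : List Int) (ps : List (List Int)) :
    (((p :: ps).zip ps).all (fun xy => f xy.1 == f xy.2) = true)
      ↔ ∀ x ∈ ps, f x = f p := by
  induction ps generalizing p with
  | nil => simp
  | cons y ys ih =>
    simp only [List.zip_cons_cons, List.all_cons, Bool.and_eq_true, beq_iff_eq, ih,
      List.mem_cons]
    constructor
    · rintro ⟨hpy, hall⟩ x hx
      rcases hx with rfl | hx
      · exact hpy.symm
      · rw [hall x hx, ← hpy]
    · intro h
      refine ⟨(h y (Or.inl rfl)).symm, fun x hx => ?_⟩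
      rw [h x (Or.inr hx), h y (Or.inl rfl)]

-- ===== VERDICT (by name: the statement is the Claim_ definition above) =====
theorem all_same_class_spec : Claim_equal_all_same_class := by
  intro partition _ hpre
  obtain ⟨hne, -, -⟩ := hpre
  obtain ⟨p, ps, rfl⟩ := List.exists_cons_of_ne_nil hne
  unfold Spec_all_same_class all_same_class all_same_class_alt
  simp only []
  set li : Int := (((PySem.List.pyGet? (p :: ps) 0).getD []).length : Int) - 1 with hli
  set f : List Int → Int := fun item => (PySem.List.pyGet? item li).getD 0 with hf
  have hget0 : (PySem.List.pyGet? (p :: ps) 0).getD [] = p := by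
    simp [PySem.List.pyGet?, PySem.List.pyIdx?]
  have hcl : (PySem.List.pyGet? ((PySem.List.pyGet? (p :: ps) 0).getD []) li).getD 0 = f p := by
    rw [hget0]
  rw [hcl, foldl_count_eq_countP (p :: ps) f (f p) 0]
  have htail : (p :: ps).tail = ps := rfl
  rw [htail, Bool.eq_iff_iff, beq_iff_eq]
  rw [show ((fun xy => (PySem.List.pyGet? xy.1 li).getD 0 == (PySem.List.pyGet? xy.2 li).getD 0)
        = fun xy : List Int × List Int => f xy.1 == f xy.2) from rfl]
  rw [zip_all_adjacent_iff f p ps]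
  rw [show ((0 : Int) + ((p :: ps).countP (fun item => f item = f p) : Int)
        = ((p :: ps).length : Int)) ↔ ((p :: ps).countP (fun item => f item = f p)
        = (p :: ps).length) by omega]
  rw [List.countP_eq_length]
  constructor
  · intro hall x hx
    simpa using hall x (List.mem_cons_of_mem _ hx)
  · intro hall x hx
    rcases List.mem_cons.1 hx with rfl | hx
    · simp
    · simpa using hall x hx
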